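-- pv_equiv track=rewrite | github.com/MaharBa264/AnalizadorElectrico | app/services/geo_len.py | _choose_id_field
-- ===== SOURCE A (Python) =====
-- import os, io, zipfile, unicodedata
--
-- def _norm(s: str) -> str:
--     s = "".join(c for c in unicodedata.normalize("NFKD", s) if not unicodedata.combining(c))
--     return s.lower().replace(" ", "").replace("_", "")
--
-- def _choose_id_field(fields):
--     """Elige un campo 'ID de línea' razonable."""
--     norm_map = { _norm(f): f for f in fields }
--     for key in ["lineaid","idlinea","linea","alimentador","etiqueta","nombre","id","codigo","tag","name"]:
--         if key in norm_map:
--             return norm_map[key]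
--     # fallback heurístico: cualquier campo que contenga 'eti' (etiqueta)
--     for f in fields:
--         if "ETI" in f.upper(): return f
--     return fields[0]
-- ===== SOURCE B (Python) =====
-- import unicodedata
--
-- def _norm(s: str) -> str:
--     s = "".join(c for c in unicodedata.normalize("NFKD", s) if not unicodedata.combining(c))
--     return s.lower().replace(" ", "").replace("_", "")
--
-- def _choose_id_field(fields):
--     """Elige un campo 'ID de línea' razonable."""
--     keys = ["lineaid","idlinea","linea","alimentador","etiqueta","nombre","id","codigo","tag","name"]
--     # Single pass: keep the best-priority match (later field wins ties, matching
--     # dict-overwrite semantics) and the first field containing 'ETI'.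
--     best = None  # (priority, field)
--     eti = None
--     for f in fields:
--         n = _norm(f)
--         if n in keys:
--             p = keys.index(n)
--             if best is None or p <= best[0]:
--                 best = (p, f)
--         if eti is None and "ETI" in f.upper():
--             eti = f
--     if best is not None:
--         return best[1]
--     if eti is not None:
--         return eti
--     return fields[0]
-- ===== Notes on version B (the rewrite author's own statement) =====
-- stated objective: alternative
-- what changed: B replaces A's staged approach (build a normalized-name dict, then try each priority key, then a fallback scan) by a single pass over fields that keeps the best-priority match (later field wins ties, i.e. dict-overwrite semantics) and the first 'ETI' field as accumulators.
import Mathlib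
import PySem

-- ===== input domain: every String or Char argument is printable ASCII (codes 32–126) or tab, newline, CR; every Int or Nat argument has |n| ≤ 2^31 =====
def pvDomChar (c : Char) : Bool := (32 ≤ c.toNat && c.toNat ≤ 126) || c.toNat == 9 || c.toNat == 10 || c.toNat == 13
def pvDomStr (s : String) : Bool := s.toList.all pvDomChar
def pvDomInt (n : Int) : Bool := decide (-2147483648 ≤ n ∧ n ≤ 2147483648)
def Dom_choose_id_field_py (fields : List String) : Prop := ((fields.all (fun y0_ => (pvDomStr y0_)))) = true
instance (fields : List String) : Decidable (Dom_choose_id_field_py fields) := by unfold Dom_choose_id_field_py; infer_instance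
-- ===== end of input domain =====

-- B replaces A's dict-then-key-loop-then-fallback-loop by ONE pass over `fields` with two
-- accumulators (best-priority match, later field wins ties; first 'ETI' field) — alternative
-- decomposition, return value only (neither program mutates its argument).

-- shared helper `_norm` (the NFKD/combining step is the identity on the ASCII domain,
-- so _norm is exactly lower-then-drop-spaces-and-underscores there)
def pyNorm (s : String) : String :=
  PySem.Str.replace (PySem.Str.replace (PySem.Str.lower s) " " "") "_" ""

def pyKeys : List String :=
  ["lineaid","idlinea","linea","alimentador","etiqueta","nombre","id","codigo","tag","name"]

-- ===== PORT A =====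
-- first loop of A: try each key against the dict
def aKeyLoop (norm_map : PySem.Dict String String) : List String → Option String
  | [] => none
  | k :: ks =>
    match norm_map.get? k with
    | some v => some v
    | none => aKeyLoop norm_map ks

-- fallback loop of A: first field containing "ETI" uppercased
def aEtiLoop : List String → Option String
  | [] => none
  | f :: fs => if PySem.Str.isIn "ETI" (PySem.Str.upper f) then some f else aEtiLoop fs

def choose_id_field_py (fields : List String) : String :=
  let norm_map : PySem.Dict String String :=
    fields.foldl (fun d f => d.insert (pyNorm f) f) PySem.Dict.empty
  match aKeyLoop norm_map pyKeys with
  | some v => v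
  | none =>
    match aEtiLoop fields with
    | some v => v
    | none => fields.headD ""   -- fields[0]; [] raises IndexError, excluded by Pre_

-- ===== PORT B =====
-- `if n in keys: p = keys.index(n)` — first index of the normalized name, if any
def bPrio (f : String) : Option Nat := PySem.List.index? pyKeys (pyNorm f)

-- `if best is None or p <= best[0]: best = (p, f)`
def bStep (best : Option (Nat × String)) (f : String) : Option (Nat × String) :=
  match bPrio f with
  | none => best
  | some p =>
    match best with
    | none => some (p, f)
    | some (q, _) => if p ≤ q then some (p, f) else best

-- `if eti is None and "ETI" in f.upper(): eti = f`
def bEtiStep (eti : Option String) (f : String) : Option String :=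
  match eti with
  | some _ => eti
  | none => if PySem.Str.isIn "ETI" (PySem.Str.upper f) then some f else none

def choose_id_field_py_alt (fields : List String) : String :=
  let st := fields.foldl (fun (st : Option (Nat × String) × Option String) f =>
    (bStep st.1 f, bEtiStep st.2 f)) (none, none)
  match st.1 with
  | some (_, v) => v
  | none =>
    match st.2 with
    | some v => v
    | none => fields.headD ""   -- fields[0]; [] raises IndexError, excluded by Pre_

-- ===== PRECONDITION & SPEC =====
-- On fields = [] the final `return fields[0]` raises IndexError; Pre_ excludes exactly that.
def Pre_choose_id_field_py (fields : List String) : Prop := fields ≠ []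
instance (fields : List String) : Decidable (Pre_choose_id_field_py fields) := by
  unfold Pre_choose_id_field_py; infer_instance

def pvWitness_choose_id_field_py : List String := (["Objeto", "Linea_ID"])

def Spec_choose_id_field_py (fields : List String) (out : String) : Prop := out = choose_id_field_py_alt fields
instance (fields : List String) (out : String) : Decidable (Spec_choose_id_field_py fields out) := by unfold Spec_choose_id_field_py; infer_instance

-- ===== CLAIM (what is proved, stated in full; the proofs are below) =====
def Claim_equal_choose_id_field_py : Prop := ∀ (fields : List String), Dom_choose_id_field_py fields → Pre_choose_id_field_py fields → Spec_choose_id_field_py fields (choose_id_field_py fields)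

-- ===== LEMMAS AND PROOFS =====

-- reference form of A's key loop: per key, last field with that normalized name
def refKeyLoop (fields : List String) : List String → Option String
  | [] => none
  | k :: ks =>
    match fields.reverse.find? (fun f => pyNorm f == k) with
    | some v => some v
    | none => refKeyLoop fields ks

-- keys paired with their absolute indices
def withIdx : List String → Nat → List (String × Nat)
  | [], _ => []
  | k :: ks, i => (k, i) :: withIdx ks (i + 1)

-- indexed per-key scan: first key (with its index) matched by some field, last such field
def ksi (fields : List String) : List (String × Nat) → Option (Nat × String)
  | [] => none
  | (k, i) :: rest =>
    match fields.reverse.find? (fun f => pyNorm f == k) with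
    | some v => some (i, v)
    | none => ksi fields rest

-- preference merge: smaller index wins, tie goes to the right (newer field)
def mrg : Option (Nat × String) → Option (Nat × String) → Option (Nat × String)
  | a, none => a
  | none, b => b
  | some (q, v), some (p, f) => if p ≤ q then some (p, f) else some (q, v)

-- (index, f) for the first key pair matching f's normalized name
def pfind (ps : List (String × Nat)) (f : String) : Option (Nat × String) :=
  match ps.find? (fun q => q.1 == pyNorm f) with
  | some (_, i) => some (i, f)
  | none => none

-- the dict built by A answers `get?` with the LAST field of the given normalized name
theorem get?_foldl_insert_norm (fields : List String) (d : PySem.Dict String String)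
    (k : String) :
    (fields.foldl (fun d f => d.insert (pyNorm f) f) d).get? k
      = (match fields.reverse.find? (fun f => pyNorm f == k) with
         | some v => some v
         | none => d.get? k) := by
  induction fields generalizing d with
  | nil => rfl
  | cons f fs ih =>
    rw [List.foldl_cons, ih, List.reverse_cons, List.find?_append]
    cases h : fs.reverse.find? (fun g => pyNorm g == k) with
    | some v => simp
    | none =>
      rw [PySem.Dict.get?_insert]
      by_cases hk : k = pyNorm f
      · simp [List.find?, hk]
      · have hne : (pyNorm f == k) = false := beq_eq_false_iff_ne.mpr (fun h => hk h.symm)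
        simp [List.find?, hne, hk]

theorem keyLoop_eq (fields : List String) (ks : List String) :
    aKeyLoop (fields.foldl (fun d f => d.insert (pyNorm f) f) PySem.Dict.empty) ks
      = refKeyLoop fields ks := by
  induction ks with
  | nil => rfl
  | cons k ks ih =>
    simp only [aKeyLoop, refKeyLoop, ih, get?_foldl_insert_norm]
    cases fields.reverse.find? (fun f => pyNorm f == k) <;> simp [PySem.Dict.get?_empty]

theorem ksi_nil (ps : List (String × Nat)) : ksi [] ps = none := by
  induction ps with
  | nil => rfl
  | cons p rest ih => obtain ⟨k, i⟩ := p; simp [ksi, ih]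

theorem ksi_mem {fields : List String} {ps : List (String × Nat)} {q : Nat} {v : String}
    (h : ksi fields ps = some (q, v)) : q ∈ ps.map Prod.snd := by
  induction ps with
  | nil => simp [ksi] at h
  | cons p rest ih =>
    obtain ⟨k, i⟩ := p
    simp only [ksi] at h
    cases hf : fields.reverse.find? (fun f => pyNorm f == k) with
    | some w => rw [hf] at h; simp at h; simp [h.1]
    | none => rw [hf] at h; simpa using Or.inr (ih h)

theorem pfind_mem {ps : List (String × Nat)} {f : String} {p : Nat} {g : String}
    (h : pfind ps f = some (p, g)) : p ∈ ps.map Prod.snd := by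
  unfold pfind at h
  cases hf : ps.find? (fun q => q.1 == pyNorm f) with
  | none => rw [hf] at h; simp at h
  | some q =>
    rw [hf] at h
    obtain ⟨k, i⟩ := q
    simp only [Option.some.injEq, Prod.mk.injEq] at h
    have hmem := List.mem_of_find?_eq_some hf
    exact h.1 ▸ List.mem_map.mpr ⟨(k, i), hmem, rfl⟩

-- the concat step: appending one field merges its key-priority into the scan result
theorem ksi_concat (ps : List (String × Nat))
    (hps : ps.Pairwise (fun a b => a.2 < b.2))
    (xs : List String) (f : String) :
    ksi (xs ++ [f]) ps = mrg (ksi xs ps) (pfind ps f) := by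
  induction ps with
  | nil => simp [ksi, mrg, pfind]
  | cons p rest ih =>
    obtain ⟨k, i⟩ := p
    have hlt : ∀ j ∈ rest.map Prod.snd, i < j := by
      intro j hj
      obtain ⟨x, hx, rfl⟩ := List.mem_map.mp hj
      exact (List.pairwise_cons.mp hps).1 _ hx
    have hrest := ih (List.pairwise_cons.mp hps).2
    by_cases hk : pyNorm f = k
    · -- f matches the head key
      have hfind : (xs ++ [f]).reverse.find? (fun g => pyNorm g == k) = some f := by
        simp [hk]
      have hpf : pfind ((k, i) :: rest) f = some (i, f) := by
        simp [pfind, List.find?, hk]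
      rw [hpf]
      simp only [ksi, hfind]
      cases hx : xs.reverse.find? (fun g => pyNorm g == k) with
      | some v => simp [mrg]
      | none =>
        simp only []
        cases hr : ksi xs rest with
        | none => simp [mrg]
        | some qv =>
          obtain ⟨q, v⟩ := qv
          have : i < q := hlt q (ksi_mem hr)
          simp [mrg, Nat.le_of_lt this]
    · -- f does not match the head key
      have hne : (pyNorm f == k) = false := beq_eq_false_iff_ne.mpr hk
      have hfind : (xs ++ [f]).reverse.find? (fun g => pyNorm g == k)
          = xs.reverse.find? (fun g => pyNorm g == k) := by
        simp [hne]
      have hpf : pfind ((k, i) :: rest) f = pfind rest f := by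
        have : (k == pyNorm f) = false := beq_eq_false_iff_ne.mpr (fun h => hk h.symm)
        simp [pfind, List.find?, this]
      rw [hpf]
      simp only [ksi, hfind]
      cases hx : xs.reverse.find? (fun g => pyNorm g == k) with
      | some v =>
        cases hp : pfind rest f with
        | none => simp [mrg]
        | some pg =>
          obtain ⟨p, g⟩ := pg
          have hip : i < p := hlt p (pfind_mem hp)
          have : ¬ p ≤ i := Nat.not_le.mpr hip
          simp [mrg, this]
      | none => exact hrest

theorem mem_withIdx_snd {ks : List String} {i : Nat} {x : String × Nat}
    (h : x ∈ withIdx ks i) : i ≤ x.2 := by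
  induction ks generalizing i with
  | nil => simp [withIdx] at h
  | cons k ks ih =>
    simp only [withIdx, List.mem_cons] at h
    rcases h with rfl | h
    · exact Nat.le_refl i
    · exact Nat.le_of_lt (Nat.lt_of_lt_of_le (Nat.lt_succ_self i) (ih h))

theorem withIdx_pairwise (ks : List String) (i : Nat) :
    (withIdx ks i).Pairwise (fun a b => a.2 < b.2) := by
  induction ks generalizing i with
  | nil => exact List.Pairwise.nil
  | cons k ks ih =>
    refine List.pairwise_cons.mpr ⟨?_, ih (i + 1)⟩
    intro x hx
    exact Nat.lt_of_lt_of_le (Nat.lt_succ_self i) (mem_withIdx_snd hx)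

-- pfind over the indexed key list IS B's priority lookup
theorem pfind_withIdx (ks : List String) (i : Nat) (f : String) :
    pfind (withIdx ks i) f
      = (PySem.List.index? ks (pyNorm f)).map (fun p => (p + i, f)) := by
  induction ks generalizing i with
  | nil => simp [withIdx, pfind, PySem.List.index?]
  | cons k ks ih =>
    by_cases hk : k = pyNorm f
    · subst hk
      rw [PySem.List.index?_cons_self]
      simp [withIdx, pfind]
    · have hb : (k == pyNorm f) = false := beq_eq_false_iff_ne.mpr hk
      rw [PySem.List.index?_cons_of_ne ks hk]
      simp only [withIdx, pfind, List.find?, hb]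
      have := ih (i + 1)
      simp only [pfind] at this
      rw [this]
      cases PySem.List.index? ks (pyNorm f) with
      | none => simp
      | some p => simp [Nat.add_assoc, Nat.add_comm 1 i]

theorem bStep_eq_mrg (acc : Option (Nat × String)) (f : String) :
    bStep acc f = mrg acc (pfind (withIdx pyKeys 0) f) := by
  rw [pfind_withIdx]
  unfold bStep bPrio
  cases PySem.List.index? pyKeys (pyNorm f) with
  | none => cases acc <;> simp [mrg]
  | some p =>
    cases acc with
    | none => simp [mrg]
    | some qv => obtain ⟨q, v⟩ := qv; by_cases h : p ≤ q <;> simp [mrg, h]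

-- B's best accumulator computes exactly the indexed per-key scan
theorem best_eq (fields : List String) :
    fields.foldl bStep none = ksi fields (withIdx pyKeys 0) := by
  induction fields using List.reverseRecOn with
  | nil => simp [ksi_nil]
  | append_singleton xs f ih =>
    rw [List.foldl_append, List.foldl_cons, List.foldl_nil, bStep_eq_mrg, ih,
      ksi_concat _ (withIdx_pairwise pyKeys 0)]

theorem refKeyLoop_eq_ksi (fields : List String) (ks : List String) (i : Nat) :
    refKeyLoop fields ks = (ksi fields (withIdx ks i)).map Prod.snd := by
  induction ks generalizing i with
  | nil => rfl
  | cons k ks ih =>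
    simp only [refKeyLoop, withIdx, ksi]
    cases fields.reverse.find? (fun f => pyNorm f == k) with
    | some v => simp
    | none => exact ih (i + 1)

theorem etiLoop_foldl_some (fs : List String) (v : String) :
    fs.foldl bEtiStep (some v) = some v := by
  induction fs with
  | nil => rfl
  | cons f fs ih => simpa [bEtiStep] using ih

theorem etiLoop_eq (fields : List String) :
    fields.foldl bEtiStep none = aEtiLoop fields := by
  induction fields with
  | nil => rfl
  | cons f fs ih =>
    simp only [List.foldl_cons, aEtiLoop, bEtiStep]
    split_ifs with h
    · exact etiLoop_foldl_some fs f
    · exact ih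

theorem foldl_pair (fields : List String)
    (a : Option (Nat × String)) (b : Option String) :
    fields.foldl (fun (st : Option (Nat × String) × Option String) f =>
        (bStep st.1 f, bEtiStep st.2 f)) (a, b)
      = (fields.foldl bStep a, fields.foldl bEtiStep b) := by
  induction fields generalizing a b with
  | nil => rfl
  | cons f fs ih => simp [List.foldl_cons, ih]

-- ===== VERDICT (by name: the statement is the Claim_ definition above) =====
theorem choose_id_field_py_spec : Claim_equal_choose_id_field_py := by
  intro fields _ _
  unfold Spec_choose_id_field_py choose_id_field_py choose_id_field_py_alt
  simp only [foldl_pair, best_eq, etiLoop_eq, keyLoop_eq,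
    refKeyLoop_eq_ksi fields pyKeys 0]
  cases ksi fields (withIdx pyKeys 0) with
  | none => rfl
  | some qv => obtain ⟨q, v⟩ := qv; rfl
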